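-- pv_equiv track=rewrite | github.com/fbesserer/CodeWars | Best Travel.py | choose_best
-- ===== SOURCE A (Python) =====
-- def choose_best(t,k,ls):
--     # es werden im Gegensatz zu den anderen Lösungen nicht die Summe aller Kombinationen erst berechnet und dann verglichen
--     # sondern die Summe wird laufend berechnet, sodass alle weiteren Kombinationen übersprungen werden, wenn bereits
--     # ersichtlich ist, zB nach 2 Zahlen, dass die Summe bereits zu groß ist.
--     # Dadurch werden Berechnungen gespart, und der Code ist effizienter
--     if k == 0: return 0
--     best = -1
--     for i, v in enumerate(ls):
--         if v > t: continue
--         b = choose_best(t - v, k - 1, ls[i+1:])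
--         if b < 0: continue
--         b += v
--         if b > best and b <= t:
--             best = b
--     return best
-- ===== SOURCE B (Python) =====
-- def choose_best(t, k, ls):
--     # take-or-skip recursion on the head of the list instead of a positional
--     # loop with slices at every level
--     if k == 0:
--         return 0
--     if not ls:
--         return -1
--     v, rest = ls[0], ls[1:]
--     best = choose_best(t, k, rest)          # skip v
--     if v <= t:                              # take v
--         b = choose_best(t - v, k - 1, rest)
--         if b >= 0 and b + v > best:
--             best = b + v
--     return best
-- ===== Notes on version B (the rewrite author's own statement) =====
-- stated objective: alternative
-- what changed: replaces A's positional for-loop over enumerate(ls) with a recursive call on the slice ls[i+1:] at every loop iteration by a binary take-or-skip recursion on the head of the list (and drops A's provably redundant 'b <= t' re-check)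
import Mathlib
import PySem

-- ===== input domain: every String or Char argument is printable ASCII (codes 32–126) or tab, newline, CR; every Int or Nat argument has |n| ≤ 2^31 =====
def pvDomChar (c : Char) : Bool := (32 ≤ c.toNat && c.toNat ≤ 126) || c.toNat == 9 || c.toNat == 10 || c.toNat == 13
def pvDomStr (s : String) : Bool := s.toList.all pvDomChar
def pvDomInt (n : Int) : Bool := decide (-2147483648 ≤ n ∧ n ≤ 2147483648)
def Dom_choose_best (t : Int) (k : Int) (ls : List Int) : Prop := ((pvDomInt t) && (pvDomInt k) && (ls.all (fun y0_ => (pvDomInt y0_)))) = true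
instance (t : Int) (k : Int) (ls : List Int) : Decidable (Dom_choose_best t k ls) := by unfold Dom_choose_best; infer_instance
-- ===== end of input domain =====

-- B replaces A's positional loop-with-slices recursion by a take-or-skip recursion
-- on the head of the list (an alternative decomposition of the same search).


-- ===== PORT A =====
-- A's 'for i, v in enumerate(ls)' uses i only to form ls[i+1:], which is exactly the
-- remaining suffix of the list; the loop is transcribed as a walk over the suffixes
-- carrying the accumulator 'best'.
mutual
  def chooseLoopA (t : Int) (k : Int) : List Int → Int → Int
    | [], best => best
    | v :: rest, best =>
      let best' :=
        if v > t then best                                  -- if v > t: continue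
        else
          let b := choose_best (t - v) (k - 1) rest         -- b = choose_best(t-v, k-1, ls[i+1:])
          if b < 0 then best                                -- if b < 0: continue
          else
            let b := b + v                                  -- b += v
            if b > best ∧ b ≤ t then b else best            -- if b > best and b <= t: best = b
      chooseLoopA t k rest best'
  termination_by ls best => (ls.length, 0)
  decreasing_by all_goals simp_wf <;> omega

  def choose_best (t : Int) (k : Int) (ls : List Int) : Int :=
    if k = 0 then 0                                         -- if k == 0: return 0
    else chooseLoopA t k ls (-1)                            -- best = -1; loop; return best
  termination_by (ls.length, 1)
  decreasing_by all_goals simp_wf <;> omega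
end

-- ===== PORT B =====
def choose_best_alt (t : Int) (k : Int) (ls : List Int) : Int :=
  if k = 0 then 0
  else
    match ls with
    | [] => -1
    | v :: rest =>
      let best := choose_best_alt t k rest                  -- skip v
      if v ≤ t then
        let b := choose_best_alt (t - v) (k - 1) rest       -- take v
        if b ≥ 0 ∧ b + v > best then b + v else best
      else best
termination_by ls.length

-- ===== PRECONDITION & SPEC =====
def Spec_choose_best (t : Int) (k : Int) (ls : List Int) (out : Int) : Prop := out = choose_best_alt t k ls
instance (t : Int) (k : Int) (ls : List Int) (out : Int) : Decidable (Spec_choose_best t k ls out) := by unfold Spec_choose_best; infer_instance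

-- ===== CLAIM (what is proved, stated in full; the proofs are below) =====
def Claim_equal_choose_best : Prop := ∀ (t : Int) (k : Int) (ls : List Int), Dom_choose_best t k ls → Spec_choose_best t k ls (choose_best t k ls)

-- ===== LEMMAS AND PROOFS =====

-- the accumulator never decreases
lemma chooseLoopA_ge (t k : Int) (ls : List Int) : ∀ best : Int, best ≤ chooseLoopA t k ls best := by
  induction ls with
  | nil => intro best; simp [chooseLoopA]
  | cons v rest ih =>
    intro best
    simp only [chooseLoopA]
    refine le_trans ?_ (ih _)
    split_ifs <;> omega

-- every stored value is ≤ t, so the result is ≤ max best t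
lemma chooseLoopA_le (t k : Int) (ls : List Int) : ∀ best : Int, chooseLoopA t k ls best ≤ max best t := by
  induction ls with
  | nil => intro best; simp [chooseLoopA]
  | cons v rest ih =>
    intro best
    simp only [chooseLoopA]
    refine le_trans (ih _) ?_
    split_ifs <;> omega

-- a nonnegative result of A (with k ≠ 0) is ≤ t
lemma choose_best_le (t k : Int) (ls : List Int) (hk : k ≠ 0) (h : 0 ≤ choose_best t k ls) :
    choose_best t k ls ≤ t := by
  rw [choose_best, if_neg hk] at h ⊢
  have := chooseLoopA_le t k ls (-1)
  omega

-- the accumulator factors out of the loop as a max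
lemma chooseLoopA_max (t k : Int) (ls : List Int) : ∀ x y : Int, chooseLoopA t k ls (max x y) = max x (chooseLoopA t k ls y) := by
  induction ls with
  | nil => intro x y; simp [chooseLoopA]
  | cons v rest ih =>
    intro x y
    simp only [chooseLoopA]
    rw [show (if v > t then max x y
        else
          if choose_best (t - v) (k - 1) rest < 0 then max x y
          else
            if choose_best (t - v) (k - 1) rest + v > max x y ∧ choose_best (t - v) (k - 1) rest + v ≤ t
            then choose_best (t - v) (k - 1) rest + v else max x y)
        = max x (if v > t then y
        else
          if choose_best (t - v) (k - 1) rest < 0 then y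
          else
            if choose_best (t - v) (k - 1) rest + v > y ∧ choose_best (t - v) (k - 1) rest + v ≤ t
            then choose_best (t - v) (k - 1) rest + v else y) from by split_ifs <;> omega]
    exact ih x _

-- the loop started anywhere ≥ -1 is the max of the start value and A's result
lemma chooseLoopA_run (t k : Int) (hk : k ≠ 0) (ls : List Int) (b : Int) (hb : -1 ≤ b) :
    chooseLoopA t k ls b = max b (choose_best t k ls) := by
  have h1 : b = max b (-1) := by omega
  rw [h1, chooseLoopA_max, choose_best, if_neg hk]
  omega

lemma choose_best_eq_alt (ls : List Int) : ∀ t k : Int, choose_best t k ls = choose_best_alt t k ls := by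
  induction ls with
  | nil =>
    intro t k
    rw [choose_best, choose_best_alt]
    split_ifs with hk
    · rfl
    · simp [chooseLoopA]
  | cons v rest ih =>
    intro t k
    by_cases hk : k = 0
    · rw [choose_best, choose_best_alt, if_pos hk, if_pos hk]
    have hArest_ge : (-1 : Int) ≤ choose_best t k rest := by
      rw [choose_best, if_neg hk]; exact chooseLoopA_ge t k rest (-1)
    have hAB' : choose_best (t - v) (k - 1) rest = choose_best_alt (t - v) (k - 1) rest := ih _ _
    have hABr : choose_best t k rest = choose_best_alt t k rest := ih _ _
    have halt : choose_best_alt t k (v :: rest) =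
        (if v ≤ t then
           (if choose_best_alt (t - v) (k - 1) rest ≥ 0 ∧
               choose_best_alt (t - v) (k - 1) rest + v > choose_best_alt t k rest
            then choose_best_alt (t - v) (k - 1) rest + v else choose_best_alt t k rest)
         else choose_best_alt t k rest) := by
      rw [choose_best_alt, if_neg hk]
    rw [choose_best, if_neg hk, halt, ← hAB', ← hABr]
    simp only [chooseLoopA]
    set A' := choose_best (t - v) (k - 1) rest with hA'
    by_cases hv : v > t
    · rw [if_pos hv, if_neg (by omega : ¬ v ≤ t), chooseLoopA_run t k hk rest (-1) (by omega)]
      omega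
    · rw [if_neg hv, if_pos (by omega : v ≤ t)]
      by_cases hb : A' < 0
      · rw [if_pos hb, if_neg (by omega : ¬ (A' ≥ 0 ∧ A' + v > choose_best t k rest)),
            chooseLoopA_run t k hk rest (-1) (by omega)]
        omega
      · rw [if_neg hb]
        have hle : A' + v ≤ t := by
          by_cases hk1 : k - 1 = 0
          · rw [hA', choose_best, if_pos hk1]; omega
          · have := choose_best_le (t - v) (k - 1) rest hk1 (by omega)
            omega
        by_cases hpos : A' + v > -1
        · rw [if_pos (by exact ⟨hpos, hle⟩), chooseLoopA_run t k hk rest _ (by omega)]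
          split_ifs <;> omega
        · rw [if_neg (by omega : ¬ (A' + v > -1 ∧ A' + v ≤ t)),
              chooseLoopA_run t k hk rest (-1) (by omega)]
          split_ifs <;> omega

-- ===== VERDICT (by name: the statement is the Claim_ definition above) =====
theorem choose_best_spec : Claim_equal_choose_best := by
  intro t k ls _
  unfold Spec_choose_best
  exact choose_best_eq_alt ls t k
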